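-- pv_equiv track=rewrite | github.com/oway13/project-presentation | Griddler Solver PYTHON3/solver.py | sorted_k_partitions
-- ===== SOURCE A (Python) =====
-- def sorted_k_partitions(seq, k):
--     """Returns a list of all unique k-partitions of `seq`.
--
--     Each partition is a list of parts, and each part is a tuple.
--
--     The parts in each individual partition will be sorted in shortlex
--     order (i.e., by length first, then lexicographically).
--
--     The overall list of partitions will then be sorted by the length
--     of their first part, the length of their second part, ...,
--     the length of their last part, and then lexicographically.
--     """
--     n = len(seq)
--     groups = []  # a list of lists, currently empty
--
--     def generate_partitions(i):
--         if i >= n: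
--             yield list(map(tuple, groups))
--         else:
--             if n - i > k - len(groups):
--                 for group in groups:
--                     group.append(seq[i])
--                     yield from generate_partitions(i + 1)
--                     group.pop()
--
--             if len(groups) < k:
--                 groups.append([seq[i]])
--                 yield from generate_partitions(i + 1)
--                 groups.pop()
--
--     result = generate_partitions(0)
--
--     # Sort the parts in each partition in shortlex order
--     result = [sorted(ps, key = lambda p: (len(p), p)) for ps in result]
--     # Sort partitions by the length of each part, then lexicographically.
--     result = sorted(result, key = lambda ps: (*map(len, ps), ps))
--
--     intlistlist = []
--     for i in result:
--         if i not in intlistlist: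
--             intlistlist.append(i)
--
--     return intlistlist
-- ===== SOURCE B (Python) =====
-- def sorted_k_partitions(seq, k):
--     """Returns a list of all unique k-partitions of `seq` (same output as A),
--     built by choosing the block of the first remaining element and recursing.
--
--     Like A, the generator can never open more blocks than there are elements
--     (with k > len(seq) every element becomes its own block) and a negative k
--     opens no blocks at all, so the effective block count is max(0, min(k, n)).
--     """
--     def splits(xs):
--         # all order-preserving (chosen, rest) divisions of xs
--         if not xs:
--             return [([], [])]
--         res = []
--         for c, r in splits(xs[1:]):
--             res.append(([xs[0]] + c, r))
--             res.append((c, [xs[0]] + r))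
--         return res
--
--     def parts(rem, kk):
--         # all partitions of rem into exactly kk blocks, first block containing rem[0]
--         if kk > len(rem):
--             return []  # more blocks than elements: impossible
--         if not rem:
--             return [[]] if kk == 0 else []
--         if kk <= 0:
--             return []
--         out = []
--         for c, r in splits(rem[1:]):
--             for p in parts(r, kk - 1):
--                 out.append([tuple([rem[0]] + c)] + p)
--         return out
--
--     k = max(0, min(k, len(seq)))
--     result = [sorted(ps, key=lambda p: (len(p), p)) for ps in parts(list(seq), k)]
--     result = sorted(result, key=lambda ps: (*map(len, ps), ps))
--     out = []
--     for ps in result: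
--         if ps not in out:
--             out.append(ps)
--     return out
-- ===== Notes on version B (the rewrite author's own statement) =====
-- stated objective: alternative
-- what changed: A assigns elements one by one to existing-or-new groups via a pruned restricted-growth recursion; B instead recurses block-by-block, pairing the first remaining element with every order-preserving subset of the rest and partitioning the leftover into one block fewer (the effective block count capped at max(0, min(k, n)), which is all A's generator can ever open), then applies the same canonical sort+dedup finishing.
import Mathlib
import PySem

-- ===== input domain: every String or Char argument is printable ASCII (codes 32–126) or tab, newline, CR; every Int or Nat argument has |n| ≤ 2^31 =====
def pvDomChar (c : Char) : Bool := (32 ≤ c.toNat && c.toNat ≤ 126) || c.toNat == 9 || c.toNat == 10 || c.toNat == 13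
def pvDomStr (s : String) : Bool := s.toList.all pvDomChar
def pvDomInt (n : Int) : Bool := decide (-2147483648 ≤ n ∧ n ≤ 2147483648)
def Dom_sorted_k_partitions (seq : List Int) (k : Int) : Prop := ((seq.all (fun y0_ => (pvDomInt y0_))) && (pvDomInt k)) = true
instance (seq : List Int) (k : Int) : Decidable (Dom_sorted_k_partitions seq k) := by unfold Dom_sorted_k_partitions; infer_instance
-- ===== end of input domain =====

-- B replaces A's element-by-element restricted-growth recursion by a block-by-block
-- recursion (first remaining element + an ordered subset of the rest, recurse on the
-- leftover, with the effective block count capped at max(0, min(k, n)) — all A's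
-- generator can ever open); same canonical sort+dedup finishing: equal outputs, no mutation.

-- shared sort keys (both Pythons use the identical key lambdas; Python's tuple
-- comparison is lexicographic, modelled exactly by the Lex order; the length lists
-- compared here always have equal length in every reachable call, where List-lex
-- equals Python's tuple comparison)
def kIn (p : List Int) : Lex (Int × List Int) := toLex (PySem.List.len p, p)
def kOut (ps : List (List Int)) : Lex (List Int × List (List Int)) := toLex (ps.map PySem.List.len, ps)

-- ===== PORT A =====
-- generate_partitions(i) with the mutable `groups` passed as state; the inner
-- `for group in groups` loop (append / recurse / pop) is the flatMap over the group
-- indices; `fuel` only makes the i+1 recursion structural (callers pass fuel ≥ n - i)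
def genA (seq : List Int) (k : Int) (fuel : Nat) (i : Nat) (groups : List (List Int)) :
    List (List (List Int)) :=
  if i ≥ seq.length then [groups]
  else
    match fuel with
    | 0 => []
    | fuel + 1 =>
      (if (seq.length : Int) - i > k - groups.length then
        (List.range groups.length).flatMap
          (fun j => genA seq k fuel (i + 1) (groups.set j (groups.getD j [] ++ [seq.getD i 0])))
      else []) ++
      (if (groups.length : Int) < k then genA seq k fuel (i + 1) (groups ++ [[seq.getD i 0]])
      else [])

def sorted_k_partitions (seq : List Int) (k : Int) : List (List (List Int)) :=
  -- result = generate_partitions(0); per-partition shortlex sort; global sort; `not in` dedup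
  PySem.List.dedup
    (PySem.List.sorted
      ((genA seq k seq.length 0 []).map (fun ps => PySem.List.sorted ps kIn))
      kOut)

-- ===== PORT B =====
-- splits(xs): all order-preserving (chosen, rest) divisions of xs
def splitsB : List Int → List (List Int × List Int)
  | [] => [([], [])]
  | x :: t =>
    (splitsB t).foldl (fun res cr => res ++ [(x :: cr.1, cr.2), (cr.1, x :: cr.2)]) []

-- parts(rem, kk): partitions of rem into exactly kk blocks, first block holding rem[0];
-- `fuel` only makes the recursion on the (shorter) leftover structural (callers pass fuel ≥ |rem|)
def partsB (fuel : Nat) (rem : List Int) (kk : Int) : List (List (List Int)) :=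
  if (rem.length : Int) < kk then []  -- more blocks than elements: impossible
  else match rem with
  | [] => if kk = 0 then [[]] else []
  | x :: t =>
    if kk ≤ 0 then []
    else
      match fuel with
      | 0 => []
      | fuel + 1 =>
        (splitsB t).foldl
          (fun out cr => out ++ (partsB fuel cr.2 (kk - 1)).map (fun p => (x :: cr.1) :: p)) []

def sorted_k_partitions_alt (seq : List Int) (k : Int) : List (List (List Int)) :=
  -- k = max(0, min(k, len(seq)))
  PySem.List.dedup
    (PySem.List.sorted
      ((partsB seq.length seq (max 0 (min k (seq.length : Int)))).map
        (fun ps => PySem.List.sorted ps kIn))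
      kOut)

-- ===== PRECONDITION & SPEC =====
def Spec_sorted_k_partitions (seq : List Int) (k : Int) (out : List (List (List Int))) : Prop :=
  out = sorted_k_partitions_alt seq k
instance (seq : List Int) (k : Int) (out : List (List (List Int))) :
    Decidable (Spec_sorted_k_partitions seq k out) := by
  unfold Spec_sorted_k_partitions; infer_instance

-- ===== CLAIM (what is proved, stated in full; the proofs are below) =====
def Claim_equal_sorted_k_partitions : Prop :=
  ∀ (seq : List Int) (k : Int), Dom_sorted_k_partitions seq k →
    Spec_sorted_k_partitions seq k (sorted_k_partitions seq k)

-- ===== LEMMAS AND PROOFS =====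

-- `Split xs c r`: xs is an order-preserving merge of c and r (what B's splits enumerates)
inductive Split : List Int → List Int → List Int → Prop where
  | nil : Split [] [] []
  | left {xs c r : List Int} (x : Int) : Split xs c r → Split (x :: xs) (x :: c) r
  | right {xs c r : List Int} (x : Int) : Split xs c r → Split (x :: xs) c (x :: r)

-- `Mix ts bs rem`: rem is consumed by feeding each element either to an open channel
-- (one of ts, keeping each channel's order) or by opening the next block of bs (so the
-- blocks bs are in first-touch order).  `Mix [] P seq` is exactly "P is a partition of
-- seq into nonempty blocks, each a subsequence of seq, listed in first-touch order" —
-- the common raw output set of both generators.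
inductive Mix : List (List Int) → List (List Int) → List Int → Prop where
  | base (ts : List (List Int)) (h : ∀ t ∈ ts, t = []) : Mix ts [] []
  | chan (ts bs : List (List Int)) (rem : List Int) (x : Int) (j : Nat) (t' : List Int)
      (hj : j < ts.length) (hget : ts[j] = x :: t')
      (hm : Mix (ts.set j t') bs rem) : Mix ts bs (x :: rem)
  | new (ts bs : List (List Int)) (rem : List Int) (x : Int) (s : List Int)
      (hm : Mix (ts ++ [s]) bs rem) : Mix ts ((x :: s) :: bs) (x :: rem)

lemma split_length {xs c r : List Int} (h : Split xs c r) : c.length + r.length = xs.length := by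
  induction h <;> simp <;> omega

lemma splitsB_mem (xs : List Int) : ∀ (c r : List Int), (c, r) ∈ splitsB xs ↔ Split xs c r := by
  induction xs with
  | nil =>
    intro c r
    constructor
    · intro h; simp [splitsB] at h; rw [h.1, h.2]; exact .nil
    · intro h; cases h; simp [splitsB]
  | cons x t ih =>
    intro c r
    rw [show splitsB (x :: t) =
        (splitsB t).foldl (fun res cr => res ++ [(x :: cr.1, cr.2), (cr.1, x :: cr.2)]) [] from rfl,
      PySem.List.foldl_append_eq_flatMap
        (g := fun (cr : List Int × List Int) => [(x :: cr.1, cr.2), (cr.1, x :: cr.2)])]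
    simp only [List.nil_append, List.mem_flatMap]
    constructor
    · rintro ⟨⟨c', r'⟩, hmem, h2⟩
      simp only [List.mem_cons, Prod.mk.injEq] at h2
      rcases h2 with ⟨hc, hr⟩ | ⟨⟨hc, hr⟩ | hfalse⟩
      · subst hc; subst hr; exact .left x ((ih _ _).mp hmem)
      · subst hc; subst hr; exact .right x ((ih _ _).mp hmem)
      · exact absurd hfalse (by simp)
    · intro h
      cases h with
      | left x hs => exact ⟨_, (ih _ _).mpr hs, by simp⟩
      | right x hs => exact ⟨_, (ih _ _).mpr hs, by simp⟩

lemma mix_nil_inv {ts bs : List (List Int)} (h : Mix ts bs []) :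
    bs = [] ∧ ∀ t ∈ ts, t = [] := by
  cases h with
  | base ts h => exact ⟨rfl, h⟩

lemma mix_bs_le {ts bs : List (List Int)} {rem : List Int} (h : Mix ts bs rem) :
    bs.length ≤ rem.length := by
  induction h with
  | base => simp
  | chan _ _ _ _ _ _ _ _ _ ih => simpa using Nat.le_succ_of_le ih
  | new _ _ _ _ _ _ ih => simpa using ih

lemma mix_cons_fwd {cts bs : List (List Int)} {rem : List Int} (h : Mix cts bs rem) :
    ∀ c ts, cts = c :: ts → ∃ r, Split rem c r ∧ Mix ts bs r := by
  induction h with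
  | base ts0 hall =>
    intro c ts heq; subst heq
    refine ⟨[], ?_, .base ts (fun t ht => hall t (List.mem_cons_of_mem _ ht))⟩
    have hc : c = [] := hall c List.mem_cons_self
    rw [hc]; exact .nil
  | chan ts0 bs rem x j t' hj hget hm ih =>
    intro c ts heq; subst heq
    cases j with
    | zero =>
      simp only [List.getElem_cons_zero] at hget
      obtain ⟨r, hs, hm'⟩ := ih t' ts (by simp)
      exact ⟨r, hget ▸ .left x hs, hm'⟩
    | succ j' =>
      simp only [List.getElem_cons_succ] at hget
      obtain ⟨r, hs, hm'⟩ := ih c (ts.set j' t') (by simp)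
      exact ⟨x :: r, .right x hs, .chan _ _ _ x j' t' (by simpa using hj) hget hm'⟩
  | new ts0 bs rem x s hm ih =>
    intro c ts heq; subst heq
    obtain ⟨r, hs, hm'⟩ := ih c (ts ++ [s]) (by simp)
    exact ⟨x :: r, .right x hs, .new _ _ _ x s hm'⟩

lemma mix_cons_bwd {xs c r : List Int} (hs : Split xs c r) :
    ∀ ts bs, Mix ts bs r → Mix (c :: ts) bs xs := by
  induction hs with
  | nil =>
    intro ts bs hm
    obtain ⟨hbs, hall⟩ := mix_nil_inv hm
    subst hbs
    exact .base ([] :: ts) (by intro t ht; rcases List.mem_cons.mp ht with h | h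
                               · exact h
                               · exact hall t h)
  | left x hs ih =>
    intro ts bs hm
    exact .chan _ _ _ x 0 _ (by simp) (by simp) (ih ts bs hm)
  | right x hs ih =>
    rename_i xs' c' r'
    intro ts bs hm
    cases hm with
    | chan ts2 bs2 rem2 x2 j t' hj hget hm' =>
      have h1 : Mix (c' :: ts.set j t') bs xs' := ih _ _ hm'
      exact .chan _ _ _ x (j + 1) t' (by simpa using hj) (by simpa using hget)
        (by simpa using h1)
    | new ts2 bs2 rem2 x2 s hm' =>
      have h1 : Mix (c' :: (ts ++ [s])) bs2 xs' := ih _ _ hm'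
      exact .new _ _ _ x s (by simpa using h1)

lemma mix_cons_iff (rem c : List Int) (ts bs : List (List Int)) :
    Mix (c :: ts) bs rem ↔ ∃ r, Split rem c r ∧ Mix ts bs r := by
  constructor
  · intro h; exact mix_cons_fwd h c ts rfl
  · rintro ⟨r, hs, hm⟩; exact mix_cons_bwd hs ts bs hm

lemma mix_nilts_cons_inv {P : List (List Int)} {x : Int} {t : List Int} :
    Mix [] P (x :: t) ↔ ∃ s P', P = (x :: s) :: P' ∧ Mix [s] P' t := by
  constructor
  · intro h
    cases h with
    | chan _ _ _ _ j t' hj => simp at hj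
    | new _ _ _ _ s hm => exact ⟨s, _, rfl, by simpa using hm⟩
  · rintro ⟨s, P', rfl, hm⟩
    exact .new _ _ _ x s (by simpa using hm)

lemma partsB_nil_iff (fuel : Nat) (kk : Int) (P : List (List Int)) :
    P ∈ partsB fuel [] kk ↔ Mix [] P [] ∧ (P.length : Int) = kk := by
  have h0 : partsB fuel [] kk = if kk = 0 then [[]] else [] := by
    rw [partsB.eq_def]
    by_cases hb : ((([] : List Int).length : Int) < kk)
    · rw [if_pos hb, if_neg (by simp at hb; omega)]
    · rw [if_neg hb]
  rw [h0]
  constructor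
  · intro h
    split at h <;> simp_all
    exact Mix.base [] (by simp)
  · rintro ⟨hm, hk⟩
    obtain ⟨hP, -⟩ := mix_nil_inv hm
    subst hP
    simp at hk
    simp [← hk]

lemma partsB_mem : ∀ (fuel : Nat) (rem : List Int) (kk : Int) (P : List (List Int)),
    rem.length ≤ fuel →
    (P ∈ partsB fuel rem kk ↔ Mix [] P rem ∧ (P.length : Int) = kk) := by
  intro fuel
  induction fuel with
  | zero =>
    intro rem kk P hlen
    have hrem : rem = [] := by cases rem <;> simp_all
    subst hrem
    exact partsB_nil_iff _ _ _
  | succ fuel ih =>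
    intro rem kk P hlen
    cases rem with
    | nil => exact partsB_nil_iff _ _ _
    | cons x t =>
      by_cases hbig : (((x :: t).length : Nat) : Int) < kk
      · rw [partsB.eq_def, if_pos hbig]
        simp only [List.not_mem_nil, false_iff]
        rintro ⟨hm, hl⟩
        have h1 : P.length ≤ (x :: t).length := mix_bs_le hm
        have h2 : ((P.length : Nat) : Int) ≤ (((x :: t).length : Nat) : Int) := by
          exact_mod_cast h1
        omega
      · by_cases hkk : kk ≤ 0
        · rw [show partsB (fuel + 1) (x :: t) kk = [] from by
            rw [partsB.eq_def, if_neg hbig]; simp [hkk]]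
          constructor
          · intro h; simp at h
          · rintro ⟨hm, hk⟩
            obtain ⟨s, P', rfl, -⟩ := mix_nilts_cons_inv.mp hm
            simp at hk; omega
        · rw [show partsB (fuel + 1) (x :: t) kk =
              (splitsB t).foldl
                (fun out cr => out ++ (partsB fuel cr.2 (kk - 1)).map (fun p => (x :: cr.1) :: p)) []
              from by rw [partsB.eq_def, if_neg hbig]; simp [hkk],
            PySem.List.foldl_append_eq_flatMap
              (g := fun (cr : List Int × List Int) =>
                (partsB fuel cr.2 (kk - 1)).map (fun p => (x :: cr.1) :: p))]
          simp only [List.nil_append, List.mem_flatMap, List.mem_map]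
          constructor
          · rintro ⟨⟨c, r⟩, hmem, p, hp, rfl⟩
            have hsplit : Split t c r := (splitsB_mem t c r).mp hmem
            have hr : r.length ≤ fuel := by
              have := split_length hsplit; simp at hlen; omega
            obtain ⟨hm, hk⟩ := (ih r (kk - 1) p hr).mp hp
            refine ⟨mix_nilts_cons_inv.mpr ⟨c, p, rfl, (mix_cons_iff t c [] p).mpr ⟨r, hsplit, hm⟩⟩, ?_⟩
            simp; omega
          · rintro ⟨hm, hk⟩
            obtain ⟨s, P', rfl, hm'⟩ := mix_nilts_cons_inv.mp hm
            obtain ⟨r, hsplit, hmr⟩ := (mix_cons_iff t s [] P').mp hm'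
            have hr : r.length ≤ fuel := by
              have := split_length hsplit; simp at hlen; omega
            refine ⟨(s, r), (splitsB_mem t s r).mpr hsplit, P', ?_, rfl⟩
            refine (ih r (kk - 1) P' hr).mpr ⟨hmr, ?_⟩
            simp at hk; omega

lemma zipWith_nil_all : ∀ (ts gs : List (List Int)), ts.length = gs.length →
    (∀ t ∈ ts, t = []) → List.zipWith (· ++ ·) gs ts = gs := by
  intro ts
  induction ts with
  | nil => intro gs h _; simp [(List.length_eq_zero_iff).mp h.symm]
  | cons t ts ih =>
    intro gs h hall
    cases gs with
    | nil => simp at h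
    | cons g gs =>
      simp only [List.zipWith_cons_cons]
      rw [hall t List.mem_cons_self, List.append_nil,
        ih gs (by simpa using h) (fun u hu => hall u (List.mem_cons_of_mem _ hu))]

lemma zipWith_set_assoc (gs ts : List (List Int)) (j : Nat) (x : Int) (t' : List Int)
    (hj : j < gs.length) (hj2 : j < ts.length) (hget : ts[j] = x :: t') :
    List.zipWith (· ++ ·) (gs.set j (gs[j] ++ [x])) (ts.set j t') =
      List.zipWith (· ++ ·) gs ts := by
  apply List.ext_getElem
  · simp
  · intro m hm1 hm2
    simp only [List.getElem_zipWith, List.getElem_set]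
    by_cases hmj : j = m
    · subst hmj
      simp [hget, List.append_assoc]
    · simp [hmj]

lemma genA_leaf (seq : List Int) (k : Int) (fuel i : Nat) (groups P : List (List Int))
    (hi : seq.length ≤ i)
    (hk : (groups.length : Int) ≤ k)
    (hr : k - groups.length ≤ (seq.length : Int) - i) :
    P ∈ genA seq k fuel i groups ↔
      ∃ ts bs, ts.length = groups.length ∧
        P = List.zipWith (· ++ ·) groups ts ++ bs ∧
        Mix ts bs (seq.drop i) ∧ (P.length : Int) = k := by
  have hgen : genA seq k fuel i groups = [groups] := by
    rw [genA.eq_def, if_pos (by omega)]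
  have hdrop : seq.drop i = [] := List.drop_eq_nil_of_le hi
  have hmk : (groups.length : Int) = k := by
    have := Int.ofNat_le.mpr hi; push_cast at this; omega
  rw [hgen, hdrop, List.mem_singleton]
  constructor
  · intro hPg
    refine ⟨List.replicate groups.length [], [], by simp, ?_, ?_, ?_⟩
    · rw [zipWith_nil_all _ _ (by simp) (fun t ht => List.eq_of_mem_replicate ht)]
      simpa using hPg
    · exact Mix.base _ (fun t ht => List.eq_of_mem_replicate ht)
    · rw [hPg]; exact hmk
  · rintro ⟨ts, bs, hts, hPeq, hm, hl⟩
    obtain ⟨hbs, hall⟩ := mix_nil_inv hm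
    subst hbs
    rw [hPeq, zipWith_nil_all ts groups hts hall, List.append_nil]

lemma genA_mem (seq : List Int) (k : Int) :
    ∀ (fuel i : Nat) (groups P : List (List Int)),
      seq.length - i ≤ fuel →
      (groups.length : Int) ≤ k →
      k - groups.length ≤ (seq.length : Int) - i →
      (P ∈ genA seq k fuel i groups ↔
        ∃ ts bs, ts.length = groups.length ∧
          P = List.zipWith (· ++ ·) groups ts ++ bs ∧
          Mix ts bs (seq.drop i) ∧ (P.length : Int) = k) := by
  intro fuel
  induction fuel with
  | zero =>
    intro i groups P hfuel hk hr
    exact genA_leaf seq k 0 i groups P (by omega) hk hr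
  | succ fuel ih =>
    intro i groups P hfuel hk hr
    by_cases hile : seq.length ≤ i
    · exact genA_leaf seq k (fuel + 1) i groups P hile hk hr
    · have hi : i < seq.length := by omega
      have hx : seq.getD i 0 = seq[i] := List.getD_eq_getElem seq 0 hi
      have hdrop : seq.drop i = seq.getD i 0 :: seq.drop (i + 1) := by
        rw [hx]; exact List.drop_eq_getElem_cons hi
      rw [show genA seq k (fuel + 1) i groups =
          ((if (seq.length : Int) - i > k - groups.length then
            (List.range groups.length).flatMap
              (fun j => genA seq k fuel (i + 1)
                (groups.set j (groups.getD j [] ++ [seq.getD i 0])))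
          else []) ++
          (if (groups.length : Int) < k then
            genA seq k fuel (i + 1) (groups ++ [[seq.getD i 0]])
          else [])) from by rw [genA.eq_def, if_neg (by omega)]]
      constructor
      · intro h
        rcases List.mem_append.mp h with h1 | h2
        · by_cases hC1 : (seq.length : Int) - i > k - groups.length
          · rw [if_pos hC1] at h1
            rcases List.mem_flatMap.mp h1 with ⟨j, hjmem, hP⟩
            have hj : j < groups.length := List.mem_range.mp hjmem
            obtain ⟨ts', bs, hts', hPeq, hm, hl⟩ :=
              (ih (i + 1) (groups.set j (groups.getD j [] ++ [seq.getD i 0])) P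
                (by omega)
                (by simpa using hk)
                (by simp only [List.length_set]; push_cast at hC1 ⊢; omega)).mp hP
            have hj2 : j < ts'.length := by
              rw [hts']; simpa using hj
            have hgd : groups.getD j [] = groups[j] := List.getD_eq_getElem groups [] hj
            have hgetset : (ts'.set j (seq.getD i 0 :: ts'[j]))[j]'(by simpa using hj2) =
                seq.getD i 0 :: ts'[j] := List.getElem_set_self (by simpa using hj2)
            have hz := zipWith_set_assoc groups (ts'.set j (seq.getD i 0 :: ts'[j])) j
              (seq.getD i 0) (ts'[j]) hj (by simpa using hj2) hgetset
            rw [List.set_set, List.set_getElem_self] at hz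
            refine ⟨ts'.set j (seq.getD i 0 :: ts'[j]), bs, by simpa using hts', ?_, ?_, hl⟩
            · rw [hPeq]
              rw [hgd] at hPeq ⊢
              rw [← hz]
            · rw [hdrop]
              refine Mix.chan _ _ _ (seq.getD i 0) j (ts'[j]) (by simpa using hj2)
                (List.getElem_set_self (by simpa using hj2)) ?_
              rw [List.set_set, List.set_getElem_self]
              exact hm
          · rw [if_neg hC1] at h1; simp at h1
        · by_cases hC2 : (groups.length : Int) < k
          · rw [if_pos hC2] at h2
            obtain ⟨ts'', bs'', hts'', hPeq, hm, hl⟩ :=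
              (ih (i + 1) (groups ++ [[seq.getD i 0]]) P
                (by omega)
                (by simp only [List.length_append, List.length_cons, List.length_nil]; omega)
                (by simp only [List.length_append, List.length_cons, List.length_nil];
                    omega)).mp h2
            have hne : ts'' ≠ [] := by
              intro hnil; rw [hnil] at hts''; simp at hts''
            obtain ⟨dl, lst, rfl⟩ : ∃ dl lst, ts'' = dl ++ [lst] :=
              ⟨ts''.dropLast, ts''.getLast hne, (List.dropLast_concat_getLast hne).symm⟩
            have hdlen : dl.length = groups.length := by
              simp only [List.length_append, List.length_cons, List.length_nil] at hts''
              simpa using hts''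
            refine ⟨dl, (seq.getD i 0 :: lst) :: bs'', hdlen, ?_, ?_, hl⟩
            · rw [hPeq, List.zipWith_append (by rw [hdlen]), List.append_assoc]
              simp
            · rw [hdrop]
              exact Mix.new _ _ _ (seq.getD i 0) lst hm
          · rw [if_neg hC2] at h2; simp at h2
      · rintro ⟨ts, bs, hts, hPeq, hm, hl⟩
        have hPlen : P.length = groups.length + bs.length := by
          rw [hPeq, List.length_append, List.length_zipWith, hts, Nat.min_self]
        rw [hdrop] at hm
        cases hm with
        | chan ts0 bs0 rem0 x0 j t' hj hget hm' =>
          have hbs : bs.length ≤ (seq.drop (i + 1)).length := mix_bs_le hm'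
          rw [List.length_drop] at hbs
          have hC1 : (seq.length : Int) - i > k - groups.length := by omega
          refine List.mem_append.mpr (Or.inl ?_)
          rw [if_pos hC1]
          refine List.mem_flatMap.mpr ⟨j, List.mem_range.mpr (by rw [← hts]; exact hj), ?_⟩
          have hjg : j < groups.length := by rw [← hts]; exact hj
          refine (ih (i + 1) (groups.set j (groups.getD j [] ++ [seq.getD i 0])) P
            (by omega)
            (by simpa using hk)
            (by simp only [List.length_set]; push_cast at hC1 ⊢; omega)).mpr
            ⟨ts.set j t', bs, by simp [hts], ?_, hm', hl⟩
          rw [hPeq]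
          rw [List.getD_eq_getElem groups [] hjg]
          rw [zipWith_set_assoc groups ts j (seq.getD i 0) t' hjg hj hget]
        | new ts0 bs0 rem0 x0 s hm' =>
          have hbs : bs0.length ≤ (seq.drop (i + 1)).length := mix_bs_le hm'
          rw [List.length_drop] at hbs
          simp only [List.length_cons] at hPlen
          have hC2 : (groups.length : Int) < k := by omega
          refine List.mem_append.mpr (Or.inr ?_)
          rw [if_pos hC2]
          refine (ih (i + 1) (groups ++ [[seq.getD i 0]]) P
            (by omega)
            (by simp only [List.length_append, List.length_cons, List.length_nil]; omega)
            (by simp only [List.length_append, List.length_cons, List.length_nil];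
                omega)).mpr
            ⟨ts ++ [s], bs0, by simp [hts], ?_, hm', hl⟩
          rw [hPeq, List.zipWith_append (by rw [hts]), List.append_assoc]
          simp

lemma genA_top (seq : List Int) (k : Int) (P : List (List Int))
    (h0 : 0 ≤ k) (hkn : k ≤ (seq.length : Int)) :
    P ∈ genA seq k seq.length 0 [] ↔ Mix [] P seq ∧ (P.length : Int) = k := by
  rw [genA_mem seq k seq.length 0 [] P (by omega) (by simpa using h0) (by simpa using hkn)]
  constructor
  · rintro ⟨ts, bs, hts, rfl, hm, hl⟩
    have hts' : ts = [] := List.length_eq_zero_iff.mp (by simpa using hts)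
    subst hts'
    exact ⟨by simpa using hm, by simpa using hl⟩
  · rintro ⟨hm, hl⟩
    exact ⟨[], P, by simp, by simp, by simpa using hm, hl⟩

lemma foldl_add_sublist {α : Type} [BEq α] :
    ∀ (l acc : List α), (l.foldl PySem.Set.add acc).Sublist (acc ++ l) := by
  intro l
  induction l with
  | nil => intro acc; simp
  | cons x l ih =>
    intro acc
    simp only [List.foldl_cons]
    refine (ih (PySem.Set.add acc x)).trans ?_
    by_cases h : PySem.Set.contains acc x
    · simp only [PySem.Set.add, if_pos h]
      exact List.Sublist.append_left (by simp) acc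
    · simp only [PySem.Set.add, if_neg h, List.append_assoc, List.singleton_append]
      exact List.Sublist.refl _

lemma dedup_sublist {α : Type} [BEq α] (l : List α) : (PySem.List.dedup l).Sublist l := by
  simpa using foldl_add_sublist l ([] : List α)

lemma kOut_injective : Function.Injective kOut := by
  intro a b h
  have := congrArg (fun z => (ofLex z).2) h
  simpa [kOut] using this

lemma finish_eq (l₁ l₂ : List (List (List Int)))
    (h : ∀ P, P ∈ l₁ ↔ P ∈ l₂) :
    PySem.List.dedup (PySem.List.sorted (l₁.map (fun ps => PySem.List.sorted ps kIn)) kOut) =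
    PySem.List.dedup (PySem.List.sorted (l₂.map (fun ps => PySem.List.sorted ps kIn)) kOut) := by
  apply PySem.List.eq_of_perm_of_pairwise_le_of_injective kOut kOut_injective
  · rw [List.perm_ext_iff_of_nodup (PySem.List.nodup_dedup _) (PySem.List.nodup_dedup _)]
    intro P
    simp only [PySem.List.mem_dedup, PySem.List.mem_sorted, List.mem_map]
    constructor
    · rintro ⟨q, hq, rfl⟩; exact ⟨q, (h q).mp hq, rfl⟩
    · rintro ⟨q, hq, rfl⟩; exact ⟨q, (h q).mpr hq, rfl⟩
  · exact List.Pairwise.sublist (dedup_sublist _) (PySem.List.sorted_pairwise _ _)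
  · exact List.Pairwise.sublist (dedup_sublist _) (PySem.List.sorted_pairwise _ _)

lemma genA_nonpos_nil (x : Int) (t : List Int) (k : Int) (hk : k ≤ 0) :
    ∀ fuel, genA (x :: t) k fuel 0 [] = [] := by
  intro fuel
  rw [genA.eq_def, if_neg (by simp)]
  cases fuel with
  | zero => rfl
  | succ fuel =>
    simp [show ¬((0 : Int) < k) from by omega]

lemma split_left_nil {xs c r : List Int} (h : Split xs c r) (hc : c = []) : r = xs := by
  induction h with
  | nil => rfl
  | left x hs ih => simp at hc
  | right x hs ih => rw [ih hc]

lemma split_nil_self : ∀ xs : List Int, Split xs [] xs := by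
  intro xs
  induction xs with
  | nil => exact .nil
  | cons x t ih => exact .right x ih

lemma mix_map_singleton : ∀ seq : List Int, Mix [] (seq.map (fun a => [a])) seq := by
  intro seq
  induction seq with
  | nil => exact Mix.base [] (by simp)
  | cons x t ih =>
    simp only [List.map_cons]
    exact mix_nilts_cons_inv.mpr
      ⟨[], t.map (fun a => [a]), rfl, (mix_cons_iff t [] [] _).mpr ⟨t, split_nil_self t, ih⟩⟩

lemma mix_singletons : ∀ (seq : List Int) (P : List (List Int)),
    Mix [] P seq → P.length = seq.length → P = seq.map (fun a => [a]) := by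
  intro seq
  induction seq with
  | nil =>
    intro P hm _
    exact (mix_nil_inv hm).1
  | cons x t ih =>
    intro P hm hl
    obtain ⟨s, P', rfl, hm'⟩ := mix_nilts_cons_inv.mp hm
    obtain ⟨r, hsplit, hmr⟩ := (mix_cons_iff t s [] P').mp hm'
    have h1 : P'.length ≤ r.length := mix_bs_le hmr
    have h2 := split_length hsplit
    have hs : s = [] := by
      have h3 : P'.length = t.length := by simpa using hl
      exact List.length_eq_zero_iff.mp (by omega)
    subst hs
    have hr : r = t := split_left_nil hsplit rfl
    subst hr
    simp only [List.map_cons]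
    rw [ih P' hmr (by simpa using hl)]

lemma genA_forced (seq : List Int) (k : Int) :
    ∀ (fuel i : Nat) (groups : List (List Int)),
      seq.length - i ≤ fuel →
      (seq.length : Int) - i ≤ k - groups.length →
      genA seq k fuel i groups = [groups ++ (seq.drop i).map (fun a => [a])] := by
  intro fuel
  induction fuel with
  | zero =>
    intro i groups h1 h2
    rw [genA.eq_def, if_pos (by omega), List.drop_eq_nil_of_le (by omega)]
    simp
  | succ fuel ih =>
    intro i groups h1 h2
    by_cases hile : seq.length ≤ i
    · rw [genA.eq_def, if_pos (by omega), List.drop_eq_nil_of_le hile]; simp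
    · have hi : i < seq.length := by omega
      have hofs : (i : Int) < (seq.length : Int) := by exact_mod_cast (by omega : i < seq.length)
      rw [show genA seq k (fuel + 1) i groups =
          ((if (seq.length : Int) - i > k - groups.length then
            (List.range groups.length).flatMap
              (fun j => genA seq k fuel (i + 1)
                (groups.set j (groups.getD j [] ++ [seq.getD i 0])))
          else []) ++
          (if (groups.length : Int) < k then
            genA seq k fuel (i + 1) (groups ++ [[seq.getD i 0]])
          else [])) from by rw [genA.eq_def, if_neg (by omega)]]
      rw [if_neg (by omega), if_pos (by omega),
        ih (i + 1) (groups ++ [[seq.getD i 0]]) (by omega)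
          (by simp only [List.length_append, List.length_cons, List.length_nil]
              push_cast; omega)]
      have hx : seq.getD i 0 = seq[i] := List.getD_eq_getElem seq 0 hi
      rw [List.nil_append, List.append_assoc, List.singleton_append, hx,
        List.drop_eq_getElem_cons hi, List.map_cons]

lemma genA_forced_top (seq : List Int) (k : Int) (h : (seq.length : Int) < k) :
    genA seq k seq.length 0 [] = [seq.map (fun a => [a])] := by
  rw [genA_forced seq k seq.length 0 [] (by omega)
    (by simp only [List.length_nil, Nat.cast_zero]; omega)]
  simp only [List.nil_append, List.drop_zero]

-- ===== VERDICT (by name: the statements are the Claim_ definitions above) =====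
theorem sorted_k_partitions_spec : Claim_equal_sorted_k_partitions := by
  intro seq k _
  show sorted_k_partitions seq k = sorted_k_partitions_alt seq k
  by_cases hk0 : 0 ≤ k
  · by_cases hkn : k ≤ (seq.length : Int)
    · -- 0 ≤ k ≤ n : both generators enumerate exactly the first-touch-ordered k-partitions
      have hcap : max 0 (min k (seq.length : Int)) = k := by omega
      unfold sorted_k_partitions sorted_k_partitions_alt
      rw [hcap]
      apply finish_eq
      intro P
      rw [genA_top seq k P hk0 hkn, partsB_mem seq.length seq k P le_rfl]
    · -- k > n : both produce exactly the all-singletons partition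
      have hnk : (seq.length : Int) < k := by omega
      have hcap : max 0 (min k (seq.length : Int)) = (seq.length : Int) := by omega
      unfold sorted_k_partitions sorted_k_partitions_alt
      rw [hcap, genA_forced_top seq k hnk]
      apply finish_eq
      intro P
      rw [List.mem_singleton, partsB_mem seq.length seq (seq.length : Int) P le_rfl]
      constructor
      · rintro rfl
        exact ⟨mix_map_singleton seq, by simp⟩
      · rintro ⟨hm, hl⟩
        exact mix_singletons seq P hm (by exact_mod_cast hl)
  · -- k < 0 : both produce nothing (resp. only the empty partition of [])
    have hk : k < 0 := by omega
    cases seq with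
    | nil =>
      unfold sorted_k_partitions sorted_k_partitions_alt
      simp only [List.length_nil, Nat.cast_zero]
      rw [show genA [] k 0 0 [] = [[]] from by rw [genA.eq_def, if_pos (by simp)],
        show partsB 0 [] (max 0 (min k 0)) = [[]] from by
          rw [show max 0 (min k (0 : Int)) = 0 from by omega]; decide]
    | cons x t =>
      unfold sorted_k_partitions sorted_k_partitions_alt
      have hcap : max 0 (min k (((x :: t).length : Nat) : Int)) = 0 := by
        have h0 : (0 : Int) ≤ ((x :: t).length : Int) := Int.natCast_nonneg _
        omega
      rw [genA_nonpos_nil x t k (le_of_lt hk), hcap,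
        show partsB (x :: t).length (x :: t) 0 = [] from by
          rw [partsB.eq_def, if_neg (not_lt.mpr (Int.natCast_nonneg _))]
          simp]
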